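-- pv_equiv track=rewrite | github.com/V1ncendzo/Auto_test_linux_Command | test_normalize/test_normalize_sysmon.py | _parse_sha256
-- ===== SOURCE A (Python) =====
-- from typing import Any, Dict, Iterable, List, Optional, Tuple
--
-- def _parse_sha256(match: Dict[str, Any]) -> Optional[str]:
--     # Prefer explicit SHA256 field, else parse from Hashes like "SHA256=..."
--     sha = match.get("SHA256")
--     if isinstance(sha, str) and sha.strip():
--         return sha.strip().lower()
--
--     hashes = match.get("Hashes")
--     if not isinstance(hashes, str) or not hashes:
--         return None
--
--     # Accept comma-separated or single
--     for part in hashes.split(','):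
--         part = part.strip()
--         if part.upper().startswith("SHA256="):
--             return part.split("=", 1)[1].strip().lower()
--     return None
-- ===== SOURCE B (Python) =====
-- from typing import Any, Dict, Optional
--
--
-- def _sha256_candidates(match: Dict[str, Any]) -> list:
--     # Collect every plausible SHA256 value in priority order: the explicit field
--     # first, then each "SHA256=<v>" entry of the comma-separated Hashes string.
--     cands = []
--     sha = match.get("SHA256")
--     if isinstance(sha, str) and sha.strip():
--         cands.append(sha)
--     hashes = match.get("Hashes")
--     if isinstance(hashes, str) and hashes:
--         for part in hashes.split(','):
--             fields = part.strip().split('=', 1)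
--             if len(fields) == 2 and fields[0].upper() == "SHA256":
--                 cands.append(fields[1])
--     return cands
--
--
-- def _parse_sha256(match: Dict[str, Any]) -> Optional[str]:
--     # Staged: gather candidates, then normalize the highest-priority one.
--     cands = _sha256_candidates(match)
--     if cands:
--         return cands[0].strip().lower()
--     return None
-- ===== Notes on version B (the rewrite author's own statement) =====
-- stated objective: alternative
-- what changed: B replaces A's early-return branch cascade with a staged gather-then-normalize decomposition: it first collects every candidate SHA256 value in priority order (the explicit field, then each Hashes part whose key before the first '=' upper-cases to SHA256), and strips/lower-cases only the first candidate at the end.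
import Mathlib
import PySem

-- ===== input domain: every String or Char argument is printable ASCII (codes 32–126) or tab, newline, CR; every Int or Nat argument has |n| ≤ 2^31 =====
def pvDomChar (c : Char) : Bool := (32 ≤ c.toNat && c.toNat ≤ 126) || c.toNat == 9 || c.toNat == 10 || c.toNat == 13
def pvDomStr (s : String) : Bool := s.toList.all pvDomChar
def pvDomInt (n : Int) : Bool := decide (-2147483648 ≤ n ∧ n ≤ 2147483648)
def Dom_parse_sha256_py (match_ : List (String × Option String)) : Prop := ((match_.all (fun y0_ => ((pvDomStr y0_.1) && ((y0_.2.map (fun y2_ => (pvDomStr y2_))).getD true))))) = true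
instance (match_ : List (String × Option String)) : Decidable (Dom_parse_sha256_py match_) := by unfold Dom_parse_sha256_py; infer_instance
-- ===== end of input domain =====

-- B (objective: alternative decomposition, same cost): instead of A's early-return branch cascade,
-- B first gathers ALL candidate SHA256 values in priority order (the explicit field, then every
-- "SHA256=<v>" entry of the comma-separated Hashes string, recognised by splitting each part on its
-- first '=' and comparing the upper-cased key) and normalizes only the first candidate at the end.

-- ===== PORT A =====
-- for part in hashes.split(','): part = part.strip()
--   if part.upper().startswith("SHA256="): return part.split("=", 1)[1].strip().lower()
def pvAHashLoop : List String → Option String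
  | [] => none
  | raw :: rest =>
    let part := PySem.Str.strip raw
    if PySem.Str.startswith (PySem.Str.upper part) "SHA256=" then
      some (PySem.Str.lower (PySem.Str.strip (((PySem.Str.splitMax? part "=" 1).getD []).getD 1 "")))
    else pvAHashLoop rest

def parse_sha256_py (match_ : List (String × Option String)) : Option String :=
  -- sha = match.get("SHA256"); if isinstance(sha, str) and sha.strip(): return sha.strip().lower()
  let shaBranch : Option String :=
    match match_.lookup "SHA256" with
    | some (some sha) =>
      if PySem.Str.strip sha ≠ "" then some (PySem.Str.lower (PySem.Str.strip sha)) else none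
    | _ => none
  match shaBranch with
  | some r => some r
  | none =>
    -- hashes = match.get("Hashes"); if not isinstance(hashes, str) or not hashes: return None
    match match_.lookup "Hashes" with
    | some (some hashes) =>
      if hashes ≠ "" then pvAHashLoop ((PySem.Str.split? hashes ",").getD []) else none
    | _ => none

-- ===== PORT B =====
-- for part in hashes.split(','): fields = part.strip().split('=', 1)
--   if len(fields) == 2 and fields[0].upper() == "SHA256": cands.append(fields[1])
def pvBHashCands : List String → List String
  | [] => []
  | part :: rest =>
    let fields := (PySem.Str.splitMax? (PySem.Str.strip part) "=" 1).getD []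
    if fields.length = 2 ∧ PySem.Str.upper (fields.getD 0 "") = "SHA256" then
      fields.getD 1 "" :: pvBHashCands rest
    else pvBHashCands rest

-- _sha256_candidates: the explicit-field candidate list followed by the Hashes candidates
def pvBCandidates (match_ : List (String × Option String)) : List String :=
  (match match_.lookup "SHA256" with
   | some (some sha) => if PySem.Str.strip sha ≠ "" then [sha] else []
   | some none => []
   | none => []) ++
  (match match_.lookup "Hashes" with
   | some (some hashes) =>
     if hashes ≠ "" then pvBHashCands ((PySem.Str.split? hashes ",").getD []) else []
   | some none => []
   | none => [])

-- if cands: return cands[0].strip().lower()  /  return None   — via head?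
def parse_sha256_py_alt (match_ : List (String × Option String)) : Option String :=
  match (pvBCandidates match_).head? with
  | some c => some (PySem.Str.lower (PySem.Str.strip c))
  | none => none

-- ===== PRECONDITION & SPEC =====
def Spec_parse_sha256_py (match_ : List (String × Option String)) (out : Option String) : Prop := out = parse_sha256_py_alt match_
instance (match_ : List (String × Option String)) (out : Option String) : Decidable (Spec_parse_sha256_py match_ out) := by unfold Spec_parse_sha256_py; infer_instance

-- ===== CLAIM (what is proved, stated in full; the proofs are below) =====
def Claim_equal_parse_sha256_py : Prop := ∀ (match_ : List (String × Option String)), Dom_parse_sha256_py match_ → Spec_parse_sha256_py match_ (parse_sha256_py match_)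

-- ===== LEMMAS AND PROOFS =====

-- upper-casing fixes '=' and nothing else maps to it

theorem pvUpperChar_eq_iff (c : Char) : PySem.Chars.upperChar c = '=' ↔ c = '=' := by
  unfold PySem.Chars.upperChar PySem.Chars.islower
  split_ifs with hl
  · have h1 : 'a' ≤ c ∧ c ≤ 'z' := by simpa using hl
    have h2 : 97 ≤ c.toNat ∧ c.toNat ≤ 122 := ⟨h1.1, h1.2⟩
    constructor
    · intro h
      have hv : (c.toNat - 32).isValidChar := Or.inl (by omega)
      have := congrArg Char.toNat h
      rw [Char.toNat_ofNat, if_pos hv] at this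
      have heq : ('=' : Char).toNat = 61 := rfl
      omega
    · intro h
      subst h
      exact absurd h2 (by decide)
  · rfl

-- splitOnMax.go with maxsplit exhausted / maxsplit 1 and sep "="

theorem pvGoZero (sep : List Char) (fuel : Nat) (l cur : List Char) (acc : List (List Char)) :
    PySem.Chars.splitOnMax.go sep fuel 0 l cur acc = ((cur.reverse ++ l) :: acc).reverse := by
  cases fuel with
  | zero => rfl
  | succ f =>
    cases l with
    | nil => simp [PySem.Chars.splitOnMax.go]
    | cons c rest => simp [PySem.Chars.splitOnMax.go]

theorem pvGoOne (l : List Char) : ∀ (fuel : Nat) (cur : List Char) (acc : List (List Char)), l.length < fuel →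
    PySem.Chars.splitOnMax.go ['='] fuel 1 l cur acc =
      if '=' ∈ l then acc.reverse ++ [cur.reverse ++ l.takeWhile (· ≠ '='), (l.dropWhile (· ≠ '=')).tail]
      else acc.reverse ++ [cur.reverse ++ l] := by
  induction l with
  | nil =>
    intro fuel cur acc hf
    cases fuel with
    | zero => omega
    | succ f => simp [PySem.Chars.splitOnMax.go]
  | cons c rest ih =>
    intro fuel cur acc hf
    cases fuel with
    | zero => omega
    | succ f =>
      by_cases hc : c = '='
      · subst hc
        rw [show PySem.Chars.splitOnMax.go ['='] (f+1) 1 ('=' :: rest) cur acc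
              = PySem.Chars.splitOnMax.go ['='] f 0 (List.drop 1 ('=' :: rest)) [] (cur.reverse :: acc) from by
            simp [PySem.Chars.splitOnMax.go]]
        rw [pvGoZero]
        simp
      · rw [show PySem.Chars.splitOnMax.go ['='] (f+1) 1 (c :: rest) cur acc
              = PySem.Chars.splitOnMax.go ['='] f 1 rest (c :: cur) acc from by
            have hc' : ¬ ('=' = c) := fun h => hc h.symm
            simp [PySem.Chars.splitOnMax.go, List.isPrefixOf, hc']]
        rw [ih f (c :: cur) acc (by simpa using Nat.lt_of_succ_lt_succ hf)]
        have hc' : ¬ ('=' = c) := fun h => hc h.symm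
        by_cases hm : '=' ∈ rest <;>
          simp [hm, hc, hc']

-- part.split("=", 1), characterised
theorem pvSplit1 (l : List Char) :
    PySem.Chars.splitOnMax l ['='] 1 =
      if '=' ∈ l then [l.takeWhile (· ≠ '='), (l.dropWhile (· ≠ '=')).tail] else [l] := by
  unfold PySem.Chars.splitOnMax
  rw [if_neg (by omega)]
  rw [show (1 : Int).toNat = 1 from rfl]
  rw [pvGoOne l (l.length + 1) [] [] (by omega)]
  split <;> simp

theorem pvPrefixEq (p : List Char) (hp : '=' ∉ p) : ∀ l : List Char,
    ((p ++ ['=']).isPrefixOf (PySem.Chars.upper l) = true) ↔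
      ('=' ∈ l ∧ PySem.Chars.upper (l.takeWhile (· ≠ '=')) = p) := by
  induction p with
  | nil =>
    intro l
    cases l with
    | nil => simp [PySem.Chars.upper]
    | cons c rest =>
      by_cases hc : c = '=' <;>
        simp [PySem.Chars.upper, List.isPrefixOf, pvUpperChar_eq_iff, hc, eq_comm (a := '=')]
  | cons a p' ih =>
    intro l
    have ha : a ≠ '=' := fun h => hp (by simp [h])
    have hp' : '=' ∉ p' := fun h => hp (by simp [h])
    cases l with
    | nil => simp [PySem.Chars.upper]
    | cons c rest =>
      have h1 := ih hp' rest
      by_cases hc : c = '='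
      · subst hc
        constructor
        · intro h
          exfalso
          have h2 : a = PySem.Chars.upperChar '=' ∧ p' ++ ['='] <+: List.map PySem.Chars.upperChar rest := by
            simpa [PySem.Chars.upper, List.isPrefixOf] using h
          exact ha (by simpa using h2.1)
        · rintro ⟨-, heq⟩
          exfalso
          simp [PySem.Chars.upper] at heq
      · constructor
        · intro h
          have h2 : (a == PySem.Chars.upperChar c) = true ∧ (p' ++ ['=']).isPrefixOf (PySem.Chars.upper rest) = true := by
            simpa [PySem.Chars.upper, List.isPrefixOf, Bool.and_eq_true] using h
          have h3 := h1.mp h2.2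
          refine ⟨List.mem_cons_of_mem _ h3.1, ?_⟩
          have hac : a = PySem.Chars.upperChar c := by simpa using h2.1
          simp only [List.takeWhile_cons, hc, ne_eq, not_false_iff,
            decide_true, if_true, PySem.Chars.upper, List.map_cons, ← hac]
          refine congrArg (a :: ·) ?_
          simpa [PySem.Chars.upper] using h3.2
        · rintro ⟨hmem, heq⟩
          have hmem' : '=' ∈ rest := by
            rcases List.mem_cons.mp hmem with h | h
            · exact absurd h.symm hc
            · exact h
          simp only [List.takeWhile_cons, hc, ne_eq, not_false_iff,
            decide_true, if_true, PySem.Chars.upper, List.map_cons] at heq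
          injection heq with hac hp2
          have hpre : (p' ++ ['=']).isPrefixOf (PySem.Chars.upper rest) = true :=
            h1.mpr ⟨hmem', by simpa [PySem.Chars.upper] using hp2⟩
          simp only [PySem.Chars.upper, List.map_cons, List.cons_append, List.isPrefixOf,
            hac, beq_self_eq_true, Bool.true_and]
          simpa [PySem.Chars.upper] using hpre

-- the per-part condition of A equals the per-part condition of B, and on success both extract the same field
theorem pvCondEq (part : String) :
    (PySem.Str.startswith (PySem.Str.upper part) "SHA256=" = true) ↔
      (((PySem.Str.splitMax? part "=" 1).getD []).length = 2 ∧
        PySem.Str.upper (((PySem.Str.splitMax? part "=" 1).getD []).getD 0 "") = "SHA256") := by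
  have hsplit : PySem.Str.splitMax? part "=" 1 =
      some ((PySem.Chars.splitOnMax part.toList ['='] 1).map String.ofList) := by
    simp [PySem.Str.splitMax?, PySem.Chars.splitMax?]
  rw [hsplit]
  have hpre := pvPrefixEq ['S','H','A','2','5','6'] (by decide) part.toList
  rw [pvSplit1]
  by_cases hm : '=' ∈ part.toList
  · rw [if_pos hm]
    constructor
    · intro h
      have h2 := hpre.mp (by simpa [PySem.Str.startswith, PySem.Chars.startswith, PySem.Str.upper] using h)
      refine ⟨rfl, ?_⟩
      have h3 : PySem.Chars.upper (List.takeWhile (fun x => !decide (x = '=')) part.toList) =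
          ['S','H','A','2','5','6'] := by simpa using h2.2
      simp [PySem.Str.upper, h3]
    · rintro ⟨-, h⟩
      have h2 : PySem.Chars.upper (part.toList.takeWhile (· ≠ '=')) = ['S','H','A','2','5','6'] := by
        have := congrArg String.toList h
        simpa [PySem.Str.upper] using this
      have := hpre.mpr ⟨hm, h2⟩
      simpa [PySem.Str.startswith, PySem.Chars.startswith, PySem.Str.upper] using this
  · rw [if_neg hm]
    constructor
    · intro h
      have h2 := hpre.mp (by simpa [PySem.Str.startswith, PySem.Chars.startswith, PySem.Str.upper] using h)
      exact absurd h2.1 hm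
    · rintro ⟨h, -⟩
      simp at h

theorem pvLoopEq (parts : List String) :
    pvAHashLoop parts =
      (match (pvBHashCands parts).head? with
       | some c => some (PySem.Str.lower (PySem.Str.strip c))
       | none => none) := by
  induction parts with
  | nil => rfl
  | cons raw rest ih =>
    by_cases hcond : PySem.Str.startswith (PySem.Str.upper (PySem.Str.strip raw)) "SHA256=" = true
    · have hB := (pvCondEq (PySem.Str.strip raw)).mp hcond
      simp only [pvAHashLoop, pvBHashCands]
      rw [if_pos hcond, if_pos hB]
      rfl
    · have hB : ¬ (((PySem.Str.splitMax? (PySem.Str.strip raw) "=" 1).getD []).length = 2 ∧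
          PySem.Str.upper (((PySem.Str.splitMax? (PySem.Str.strip raw) "=" 1).getD []).getD 0 "") = "SHA256") :=
        fun h => hcond ((pvCondEq (PySem.Str.strip raw)).mpr h)
      simp only [pvAHashLoop, pvBHashCands]
      rw [if_neg hB, if_neg hcond]
      exact ih

-- ===== VERDICT (by name: the statement is the Claim_ definition above) =====
theorem parse_sha256_py_spec : Claim_equal_parse_sha256_py := by
  intro match_ _
  unfold Spec_parse_sha256_py parse_sha256_py parse_sha256_py_alt pvBCandidates
  have hrest : ∀ (t : List String),
      (match t.head? with
       | some c => some (PySem.Str.lower (PySem.Str.strip c))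
       | none => none : Option String) =
      (match (([] : List String) ++ t).head? with
       | some c => some (PySem.Str.lower (PySem.Str.strip c))
       | none => none : Option String) := by intro t; rfl
  cases h1 : match_.lookup "SHA256" with
  | some o =>
    cases o with
    | some sha =>
      by_cases hs : PySem.Str.strip sha ≠ ""
      · dsimp only; rw [if_pos hs, if_pos hs]; rfl
      · dsimp only; rw [if_neg hs, if_neg hs, ← hrest]
        cases h2 : match_.lookup "Hashes" with
        | some o2 =>
          cases o2 with
          | some hashes =>
            by_cases hh : hashes ≠ ""
            · dsimp only; rw [if_pos hh, if_pos hh]; exact pvLoopEq _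
            · dsimp only; rw [if_neg hh, if_neg hh]; rfl
          | none => rfl
        | none => rfl
    | none =>
      dsimp only; rw [← hrest]
      cases h2 : match_.lookup "Hashes" with
      | some o2 =>
        cases o2 with
        | some hashes =>
          by_cases hh : hashes ≠ ""
          · dsimp only; rw [if_pos hh, if_pos hh]; exact pvLoopEq _
          · dsimp only; rw [if_neg hh, if_neg hh]; rfl
        | none => rfl
      | none => rfl
  | none =>
    dsimp only; rw [← hrest]
    cases h2 : match_.lookup "Hashes" with
    | some o2 =>
      cases o2 with
      | some hashes =>
        by_cases hh : hashes ≠ ""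
        · dsimp only; rw [if_pos hh, if_pos hh]; exact pvLoopEq _
        · dsimp only; rw [if_neg hh, if_neg hh]; rfl
      | none => rfl
    | none => rfl
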